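-- pv_equiv track=rewrite | github.com/Maria-Seghezzi/Python-Enigma-machine | main.py | parse_connections
-- ===== SOURCE A (Python) =====
-- def parse_connections(connection_string):
--     connections_list = connection_string.replace(" ", "").split(",")
--     connections = {}
--     for connection in connections_list:
--         if ":" not in connection:
--             raise ValueError
--         a, b = connection.split(":")
--         a, b = a.upper(), b.upper()
--         if a in connections or b in connections or a == b:
--             raise ValueError
--         connections[a] = b
--         connections[b] = a
--     return connections
-- ===== SOURCE B (Python) =====
-- def parse_connections(connection_string):
--     tokens = connection_string.replace(" ", "").split(",")
--     pairs = []
--     for token in tokens: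
--         if ":" not in token:
--             raise ValueError
--         a, b = token.split(":")
--         pairs.append((a.upper(), b.upper()))
--     keys = [end for pair in pairs for end in pair]
--     if len(keys) != len(set(keys)):
--         raise ValueError
--     connections = {}
--     for a, b in pairs:
--         connections[a] = b
--         connections[b] = a
--     return connections
-- ===== Notes on version B (the rewrite author's own statement) =====
-- stated objective: alternative
-- what changed: A validates and inserts incrementally, checking dict membership of each endpoint while building; B separates concerns into three passes: parse all tokens into a pair list, reject every collision (including a==b) at once with one global length-vs-set uniqueness check on the collected endpoints, then build the bidirectional dict in a dedicated loop.
import Mathlib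
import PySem

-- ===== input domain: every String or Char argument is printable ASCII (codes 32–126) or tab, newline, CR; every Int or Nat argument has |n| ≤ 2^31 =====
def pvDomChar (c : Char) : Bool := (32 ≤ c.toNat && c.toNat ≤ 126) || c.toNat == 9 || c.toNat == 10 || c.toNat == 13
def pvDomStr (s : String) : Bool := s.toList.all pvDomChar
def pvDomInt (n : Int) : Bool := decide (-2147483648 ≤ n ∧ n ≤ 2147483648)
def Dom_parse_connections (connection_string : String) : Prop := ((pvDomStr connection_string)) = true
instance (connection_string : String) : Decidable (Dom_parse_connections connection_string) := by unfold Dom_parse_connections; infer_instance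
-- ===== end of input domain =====

-- B replaces A's incremental build-with-membership-check loop by parse-all-pairs, one global
-- set-uniqueness check on the collected endpoints, then a separate dict-building pass (alternative decomposition).


-- shared string helpers (PySem.Str.split? is `some` here since both separators are non-empty)
def pcTokens (s : String) : List String :=
  (PySem.Str.split? (PySem.Str.replace s " " "") ",").getD []
def pcSplitColon (t : String) : List String :=
  (PySem.Str.split? t ":").getD []

-- ===== PORT A =====
def pcLoopA : List String → PySem.Dict String String → Option (PySem.Dict String String)
  | [], d => some d
  | t :: ts, d =>
    if PySem.Str.isIn ":" t then
      match pcSplitColon t with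
      | [a0, b0] =>
        let a := PySem.Str.upper a0
        let b := PySem.Str.upper b0
        if d.contains a || d.contains b || a == b then none
        else pcLoopA ts ((d.insert a b).insert b a)
      | _ => none       -- unpacking `a, b = …` raises ValueError (≠ 2 parts)
    else none           -- explicit `raise ValueError`

def parse_connections (connection_string : String) : List (String × String) :=
  match pcLoopA (pcTokens connection_string) PySem.Dict.empty with
  | some d => d.items
  | none => []          -- Python A raises ValueError here; excluded by Pre_

-- ===== PORT B =====
def pcParseB : List String → Option (List (String × String))
  | [] => some []
  | t :: ts =>
    if PySem.Str.isIn ":" t then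
      match pcSplitColon t with
      | [a0, b0] =>
        (pcParseB ts).map (fun ps => (PySem.Str.upper a0, PySem.Str.upper b0) :: ps)
      | _ => none
    else none

def parse_connections_alt (connection_string : String) : List (String × String) :=
  match pcParseB (pcTokens connection_string) with
  | none => []          -- Source B raises ValueError while parsing; excluded by Pre_
  | some pairs =>
    let keys := pairs.flatMap (fun p => [p.1, p.2])
    if keys.length ≠ (PySem.Set.ofList keys).length then []   -- Source B raises ValueError; excluded by Pre_
    else (pairs.foldl (fun d p => (d.insert p.1 p.2).insert p.2 p.1) PySem.Dict.empty).items

-- ===== PRECONDITION & SPEC =====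
-- Pre_ excludes exactly the inputs on which Python A raises ValueError: some space-stripped,
-- comma-split token does not contain exactly one colon separator, or an endpoint repeats after uppercasing.
def Pre_parse_connections (connection_string : String) : Prop :=
  (∀ t ∈ pcTokens connection_string,
      PySem.Str.isIn ":" t = true ∧ (pcSplitColon t).length = 2) ∧
  ((pcTokens connection_string).flatMap
      (fun t => (pcSplitColon t).map PySem.Str.upper)).Nodup
instance (connection_string : String) : Decidable (Pre_parse_connections connection_string) := by
  unfold Pre_parse_connections; infer_instance

def pvWitness_parse_connections : String := "a:b, C:d"

def Spec_parse_connections (connection_string : String) (out : List (String × String)) : Prop := out = parse_connections_alt connection_string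
instance (connection_string : String) (out : List (String × String)) : Decidable (Spec_parse_connections connection_string out) := by unfold Spec_parse_connections; infer_instance

-- ===== CLAIM (what is proved, stated in full; the proofs are below) =====
def Claim_equal_parse_connections : Prop := ∀ (connection_string : String), Dom_parse_connections connection_string → Pre_parse_connections connection_string → Spec_parse_connections connection_string (parse_connections connection_string)

-- ===== LEMMAS AND PROOFS =====

-- the parsed (uppercased) pairs of a token list on which parsing succeeds
def pcPairs (toks : List String) : List (String × String) :=
  toks.flatMap (fun t => match pcSplitColon t with
    | [a0, b0] => [(PySem.Str.upper a0, PySem.Str.upper b0)]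
    | _ => [])

def pcFlat (ps : List (String × String)) : List (String × String) :=
  ps.flatMap (fun p => [(p.1, p.2), (p.2, p.1)])

def pcKeys (ps : List (String × String)) : List String :=
  ps.flatMap (fun p => [p.1, p.2])

theorem pcLen2 {l : List String} (h : l.length = 2) : ∃ a b, l = [a, b] := by
  match l, h with
  | [a, b], _ => exact ⟨a, b, rfl⟩

theorem pcKeys_cons (p : String × String) (ps : List (String × String)) :
    pcKeys (p :: ps) = p.1 :: p.2 :: pcKeys ps := rfl

theorem pcKeys_pairs (toks : List String)
    (h : ∀ t ∈ toks, PySem.Str.isIn ":" t = true ∧ (pcSplitColon t).length = 2) :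
    pcKeys (pcPairs toks) = toks.flatMap (fun t => (pcSplitColon t).map PySem.Str.upper) := by
  induction toks with
  | nil => rfl
  | cons t ts ih =>
    obtain ⟨a0, b0, hsp⟩ := pcLen2 (h t (List.mem_cons_self ..)).2
    have ih' := ih (fun x hx => h x (List.mem_cons_of_mem _ hx))
    rw [show pcPairs (t :: ts) = (PySem.Str.upper a0, PySem.Str.upper b0) :: pcPairs ts from by
          simp [pcPairs, hsp],
        pcKeys_cons, List.flatMap_cons, hsp, ih']
    rfl

theorem pcLoopA_spec (toks : List String) (d : PySem.Dict String String)
    (h : ∀ t ∈ toks, PySem.Str.isIn ":" t = true ∧ (pcSplitColon t).length = 2)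
    (hnd : (d.keys ++ pcKeys (pcPairs toks)).Nodup) :
    pcLoopA toks d = some (PySem.Dict.mk (d.items ++ pcFlat (pcPairs toks))) := by
  induction toks generalizing d with
  | nil =>
    simp [pcLoopA, pcPairs, pcFlat]
  | cons t ts ih =>
    obtain ⟨hin, hlen⟩ := h t (List.mem_cons_self ..)
    obtain ⟨a0, b0, hsp⟩ := pcLen2 hlen
    have hpairs : pcPairs (t :: ts) =
        (PySem.Str.upper a0, PySem.Str.upper b0) :: pcPairs ts := by
      simp [pcPairs, hsp]
    set a := PySem.Str.upper a0 with ha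
    set b := PySem.Str.upper b0 with hb
    rw [hpairs] at hnd
    simp only [pcKeys, List.flatMap_cons] at hnd
    -- hnd : (d.keys ++ a :: b :: pcKeys (pcPairs ts)).Nodup
    have hna : a ∉ d.keys := by
      intro hm
      exact (List.disjoint_of_nodup_append hnd) hm (by simp)
    have hnb : b ∉ d.keys := by
      intro hm
      exact (List.disjoint_of_nodup_append hnd) hm (by simp)
    have hrest := hnd.of_append_right
    have hab : a ≠ b := by
      intro hEq; exact (List.nodup_cons.mp hrest).1 (by simp [hEq])
    have hca : d.contains a = false := by
      rw [Bool.eq_false_iff]; intro hc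
      exact hna ((PySem.Dict.contains_iff_mem_keys d a).mp hc)
    have hcb : d.contains b = false := by
      rw [Bool.eq_false_iff]; intro hc
      exact hnb ((PySem.Dict.contains_iff_mem_keys d b).mp hc)
    have hcb' : (d.insert a b).contains b = false := by
      rw [PySem.Dict.contains_insert, hcb]
      simp [hab.symm]
    have hstep : pcLoopA (t :: ts) d = pcLoopA ts ((d.insert a b).insert b a) := by
      simp only [pcLoopA, hin, if_pos, hsp]
      rw [if_neg (by simp; exact ⟨⟨hca, hcb⟩, hab⟩)]
    have hkeys : ((d.insert a b).insert b a).keys = d.keys ++ [a, b] := by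
      rw [PySem.Dict.keys_insert_of_not_contains _ _ hcb',
          PySem.Dict.keys_insert_of_not_contains _ _ hca, List.append_assoc]
      rfl
    have hitems : ((d.insert a b).insert b a).items = d.items ++ [(a, b), (b, a)] := by
      rw [PySem.Dict.items_insert_of_not_contains _ _ hcb',
          PySem.Dict.items_insert_of_not_contains _ _ hca, List.append_assoc]
      rfl
    have hnd' : (((d.insert a b).insert b a).keys ++ pcKeys (pcPairs ts)).Nodup := by
      rw [hkeys]
      have : d.keys ++ [a, b] ++ pcKeys (pcPairs ts)
           = d.keys ++ (a :: b :: pcKeys (pcPairs ts)) := by simp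
      rw [this]; exact hnd
    rw [hstep, ih _ (fun x hx => h x (List.mem_cons_of_mem _ hx)) hnd', hitems, hpairs]
    simp [pcFlat]

theorem pcParseB_spec (toks : List String)
    (h : ∀ t ∈ toks, PySem.Str.isIn ":" t = true ∧ (pcSplitColon t).length = 2) :
    pcParseB toks = some (pcPairs toks) := by
  induction toks with
  | nil => rfl
  | cons t ts ih =>
    obtain ⟨hin, hlen⟩ := h t (List.mem_cons_self ..)
    obtain ⟨a0, b0, hsp⟩ := pcLen2 hlen
    simp only [pcParseB, hin, if_pos, hsp,
      ih (fun x hx => h x (List.mem_cons_of_mem _ hx)), Option.map_some]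
    simp [pcPairs, hsp]

theorem pcFoldB_spec (ps : List (String × String)) (d : PySem.Dict String String)
    (hnd : (d.keys ++ pcKeys ps).Nodup) :
    (ps.foldl (fun d p => (d.insert p.1 p.2).insert p.2 p.1) d).items
      = d.items ++ pcFlat ps := by
  induction ps generalizing d with
  | nil => simp [pcFlat]
  | cons p ps ih =>
    simp only [pcKeys, List.flatMap_cons] at hnd
    have hna : p.1 ∉ d.keys := by
      intro hm; exact (List.disjoint_of_nodup_append hnd) hm (by simp)
    have hnb : p.2 ∉ d.keys := by
      intro hm; exact (List.disjoint_of_nodup_append hnd) hm (by simp)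
    have hab : p.1 ≠ p.2 := by
      intro hEq
      exact (List.nodup_cons.mp hnd.of_append_right).1 (by simp [hEq])
    have hca : d.contains p.1 = false := by
      rw [Bool.eq_false_iff]; intro hc
      exact hna ((PySem.Dict.contains_iff_mem_keys d p.1).mp hc)
    have hcb : d.contains p.2 = false := by
      rw [Bool.eq_false_iff]; intro hc
      exact hnb ((PySem.Dict.contains_iff_mem_keys d p.2).mp hc)
    have hcb' : (d.insert p.1 p.2).contains p.2 = false := by
      rw [PySem.Dict.contains_insert, hcb]
      simp [hab.symm]
    have hkeys : ((d.insert p.1 p.2).insert p.2 p.1).keys = d.keys ++ [p.1, p.2] := by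
      rw [PySem.Dict.keys_insert_of_not_contains _ _ hcb',
          PySem.Dict.keys_insert_of_not_contains _ _ hca, List.append_assoc]
      rfl
    have hitems : ((d.insert p.1 p.2).insert p.2 p.1).items
        = d.items ++ [(p.1, p.2), (p.2, p.1)] := by
      rw [PySem.Dict.items_insert_of_not_contains _ _ hcb',
          PySem.Dict.items_insert_of_not_contains _ _ hca, List.append_assoc]
      rfl
    have hnd' : (((d.insert p.1 p.2).insert p.2 p.1).keys ++ pcKeys ps).Nodup := by
      rw [hkeys]
      have : d.keys ++ [p.1, p.2] ++ pcKeys ps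
           = d.keys ++ (p.1 :: p.2 :: pcKeys ps) := by simp
      rw [this]; exact hnd
    rw [List.foldl_cons, ih _ hnd', hitems, pcFlat]
    simp [pcFlat]

-- ===== VERDICT (by name: the statement is the Claim_ definition above) =====
theorem parse_connections_spec : Claim_equal_parse_connections := by
  intro s _ hpre
  obtain ⟨h1, h2⟩ := hpre
  have hkeysEq := pcKeys_pairs (pcTokens s) h1
  have hnd : pcKeys (pcPairs (pcTokens s)) |>.Nodup := by rw [hkeysEq]; exact h2
  have hndE : ((PySem.Dict.empty : PySem.Dict String String).keys
      ++ pcKeys (pcPairs (pcTokens s))).Nodup := by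
    simpa [PySem.Dict.empty, PySem.Dict.keys] using hnd
  unfold Spec_parse_connections parse_connections parse_connections_alt
  rw [pcLoopA_spec _ _ h1 hndE, pcParseB_spec _ h1]
  have hset : PySem.Set.ofList (pcKeys (pcPairs (pcTokens s)))
      = pcKeys (pcPairs (pcTokens s)) := PySem.Set.ofList_eq_self_of_nodup _ hnd
  have hfold := pcFoldB_spec (pcPairs (pcTokens s)) PySem.Dict.empty hndE
  simp only [pcKeys] at hset
  simp [hset, PySem.Dict.empty]
  exact (hfold.trans (by simp [PySem.Dict.empty])).symm
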